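-- pv_equiv track=rewrite | github.com/cosetteke/Bioinformatics-Algorithm | evaluation/1stevaluation_lastbanana.py | winning_outcomes
-- ===== SOURCE A (Python) =====
-- def has_won(player1, player2, L):
--     """
--     :param player1: the outcome (int) of a roll of the die by player 1
--     :param player2: the outcome (int) of a roll of the die by player 2
--     :param L: the upper limit L(int)
--     :return: Boolean value (bool) that indicates whether player 1 has won the game.
--     >>> has_won(3, 2, 4)
--     True
--     >>> has_won(1, 5, 4)
--     False
--     """
--     return max(player1, player2) <= L
--
-- def winning_outcomes(n, L):
--     """
--     :param n: the number of sides (int) of the die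
--     :param L: the upper limit  (int)
--     :return: a tuple with two numbers (int): possible outcomes player 1 wins an player 2 wins.
--     >>> winning_outcomes(6, 4)
--     (16, 20)
--     """
--     pl1_win = 0
--     pl2_win = 0
--     for player1 in range(1, n+1):
--         for player2 in range(1, n+1):
--             if has_won(player1, player2, L): # if pl1 wins
--                 pl1_win += 1
--             else: # if pl2 wins
--                 pl2_win += 1
--     return (pl1_win, pl2_win)
-- ===== SOURCE B (Python) =====
-- def winning_outcomes(n, L):
--     # closed form: player 1 wins exactly when both rolls are <= L, i.e. on
--     # m*m of the k*k equally listed pairs, where k sides exist and m of them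
--     # are <= L; player 2 wins the remaining k*k - m*m pairs.
--     k = max(n, 0)
--     m = max(0, min(L, k))
--     return (m * m, k * k - m * m)
-- ===== Notes on version B (the rewrite author's own statement) =====
-- stated objective: faster
-- what changed: Replaced the quadratic double loop over all die-roll pairs with an O(1) closed form: m = clamp(L, 0, n) sides let player 1 win, giving (m*m, n*n - m*m) with n clamped at 0.
import Mathlib
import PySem

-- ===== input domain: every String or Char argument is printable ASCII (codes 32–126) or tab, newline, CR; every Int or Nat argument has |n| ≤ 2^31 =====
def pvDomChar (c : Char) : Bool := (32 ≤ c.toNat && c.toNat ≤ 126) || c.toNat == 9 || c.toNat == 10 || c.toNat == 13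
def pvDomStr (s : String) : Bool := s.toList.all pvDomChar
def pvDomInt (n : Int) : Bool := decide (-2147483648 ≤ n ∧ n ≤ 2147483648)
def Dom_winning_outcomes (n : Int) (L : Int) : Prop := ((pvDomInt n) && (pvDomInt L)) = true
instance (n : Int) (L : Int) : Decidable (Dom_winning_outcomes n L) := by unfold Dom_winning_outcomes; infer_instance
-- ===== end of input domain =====

-- B replaces A's quadratic double loop over all roll pairs by the closed form
-- (m*m, k*k - m*m) with k = max(n,0) sides and m = clamp(L,0,k) winning sides.

-- ===== PORT A =====
-- has_won(player1, player2, L) = max(player1, player2) <= L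
def has_won (player1 player2 L : Int) : Bool := max player1 player2 ≤ L

def winning_outcomes (n : Int) (L : Int) : List Int :=
  let st :=
    (PySem.List.pyRange 1 (n + 1)).foldl
      (fun st player1 =>
        (PySem.List.pyRange 1 (n + 1)).foldl
          (fun st player2 =>
            if has_won player1 player2 L then (st.1 + 1, st.2)
            else (st.1, st.2 + 1))
          st)
      ((0 : Int), (0 : Int))
  [st.1, st.2]

-- ===== PORT B =====
def winning_outcomes_alt (n : Int) (L : Int) : List Int :=
  let k := max n 0
  let m := max 0 (min L k)
  [m * m, k * k - m * m]

-- ===== PRECONDITION & SPEC =====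
def Spec_winning_outcomes (n : Int) (L : Int) (out : List Int) : Prop := out = winning_outcomes_alt n L
instance (n : Int) (L : Int) (out : List Int) : Decidable (Spec_winning_outcomes n L out) := by unfold Spec_winning_outcomes; infer_instance

-- ===== CLAIM (what is proved, stated in full; the proofs are below) =====
def Claim_equal_winning_outcomes : Prop := ∀ (n : Int) (L : Int), Dom_winning_outcomes n L → Spec_winning_outcomes n L (winning_outcomes n L)

-- ===== LEMMAS AND PROOFS =====

-- the inner loop adds, to any start state, the count of pairs player 1 wins and the rest
theorem inner_fold (L p1 : Int) (xs : List Int) : ∀ (a b : Int),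
    xs.foldl (fun st player2 =>
        if has_won p1 player2 L then (st.1 + 1, st.2) else (st.1, st.2 + 1)) (a, b)
      = (a + (xs.countP (fun p2 => has_won p1 p2 L) : Int),
         b + ((xs.length : Int) - (xs.countP (fun p2 => has_won p1 p2 L) : Int))) := by
  induction xs with
  | nil => intro a b; simp
  | cons x xs ih =>
      intro a b
      by_cases h : has_won p1 x L <;>
        · rw [List.foldl_cons]
          simp only [h, if_true, if_false, List.countP_cons, ih, Prod.mk.injEq,
            Bool.false_eq_true, List.length_cons]
          constructor <;> push_cast <;> ring

-- max p1 p2 ≤ L splits: player 1's own roll decides whether he can win at all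
theorem countP_has_won (L p1 : Int) (xs : List Int) :
    xs.countP (fun p2 => has_won p1 p2 L)
      = if p1 ≤ L then xs.countP (fun p2 => decide (p2 ≤ L)) else 0 := by
  by_cases h : p1 ≤ L
  · simp only [h, if_true]
    apply List.countP_congr
    intro x _
    simp [has_won, h]
  · simp only [h, if_false]
    rw [List.countP_eq_zero]
    intro x _
    simp [has_won]
    omega

-- the whole double loop, from any start state
theorem outer_fold (L : Int) (xs : List Int) (ys : List Int) : ∀ (a b : Int),
    ys.foldl (fun st player1 =>
        xs.foldl (fun st player2 =>
          if has_won player1 player2 L then (st.1 + 1, st.2) else (st.1, st.2 + 1)) st) (a, b)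
      = (a + (ys.countP (fun p1 => decide (p1 ≤ L)) : Int) * (xs.countP (fun p2 => decide (p2 ≤ L)) : Int),
         b + (ys.length : Int) * (xs.length : Int)
           - (ys.countP (fun p1 => decide (p1 ≤ L)) : Int) * (xs.countP (fun p2 => decide (p2 ≤ L)) : Int)) := by
  induction ys with
  | nil => intro a b; simp
  | cons y ys ih =>
      intro a b
      rw [List.foldl_cons, inner_fold, countP_has_won, ih]
      by_cases h : y ≤ L <;>
        · simp only [h, if_true, if_false, List.countP_cons, Prod.mk.injEq,
            decide_true, decide_false, Bool.false_eq_true, List.length_cons]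
          constructor <;> push_cast <;> ring

-- how many sides of the die are ≤ L
theorem countP_pyRange_le (n L : Int) :
    ((PySem.List.pyRange 1 (n + 1)).countP (fun x => decide (x ≤ L)) : Int)
      = max 0 (min L (max n 0)) := by
  by_cases hn : n ≤ 0
  · have hnil : PySem.List.pyRange 1 (n + 1) = [] := by
      have := PySem.List.length_pyRange_one 1 (n + 1)
      have h0 : (n + 1 - 1).toNat = 0 := by omega
      rw [h0] at this
      exact List.eq_nil_of_length_eq_zero this
    rw [hnil]
    simp only [List.countP_nil, Nat.cast_zero]
    omega
  · obtain ⟨k, hk⟩ : ∃ k : Nat, n = (k : Int) := ⟨n.toNat, by omega⟩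
    subst hk
    clear hn
    induction k with
    | zero =>
        norm_num [PySem.List.pyRange]
    | succ k ih =>
        have hstep : PySem.List.pyRange 1 ((k : Int) + 1 + 1)
            = PySem.List.pyRange 1 ((k : Int) + 1) ++ [(k : Int) + 1] :=
          PySem.List.pyRange_one_succ_right (by omega)
        push_cast
        rw [hstep, List.countP_append, List.countP_singleton]
        push_cast at ih
        by_cases h : (k : Int) + 1 ≤ L <;>
          · simp only [h, decide_true, decide_false, if_true]
            push_cast
            rw [ih]
            omega

theorem length_range_n (n : Int) : ((PySem.List.pyRange 1 (n + 1)).length : Int) = max n 0 := by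
  rw [PySem.List.length_pyRange_one]
  omega

-- ===== VERDICT (by name: the statement is the Claim_ definition above) =====
theorem winning_outcomes_spec : Claim_equal_winning_outcomes := by
  intro n L _
  unfold Spec_winning_outcomes winning_outcomes winning_outcomes_alt
  rw [outer_fold, countP_pyRange_le, length_range_n]
  norm_num
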